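-- pv_equiv track=rewrite | github.com/MrBrantCode/unitest_baseline | mut_generate/mist_train_cf/cf_73250/solution.py | is_pleasant
-- ===== SOURCE A (Python) =====
-- import collections
-- import math
--
-- def is_pleasant(s):
--     # function to check prime number
--     def is_prime(n):
--         if n<2 or (n>2 and n%2==0):
--             return False
--         for i in range(3,int(math.sqrt(n))+1,2):
--             if n%i==0:
--                return False
--         return True
--
--     # length guard clause
--     if len(s) < 4:
--         return False
--
--     letter_frequencies = collections.Counter(s)
--
--     # distinct letters appears at least twice
--     for freq in letter_frequencies.values():
--         if freq < 2 or not is_prime(freq):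
--             return False
--
--     # check every four consecutive letters are distinct
--     queue = collections.deque(maxlen=4)
--     for letter in s:
--         if letter in queue:
--             return False
--         queue.append(letter)
--
--     # check no identical letters next to each other
--     for i in range(len(s)-1):
--         if s[i] == s[i+1]:
--             return False
--
--     return True
-- ===== SOURCE B (Python) =====
-- def is_pleasant(s):
--     if len(s) < 4:
--         return False
--     n = len(s)
--     # composite sieve table: comp[m] is True iff m = d*k for some d, k >= 2
--     comp = [False] * (n + 1)
--     for d in range(2, n + 1):
--         for m in range(2 * d, n + 1, d):
--             comp[m] = True
--     # occurrence positions per letter, in increasing order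
--     pos = {}
--     for i, c in enumerate(s):
--         pos.setdefault(c, []).append(i)
--     for ps in pos.values():
--         f = len(ps)
--         if f < 2 or comp[f]:
--             return False
--         for a, b in zip(ps, ps[1:]):
--             if b - a < 5:
--                 return False
--     return True
-- ===== Notes on version B (the rewrite author's own statement) =====
-- stated objective: alternative
-- what changed: Instead of A's sliding deque window plus adjacency pass and sqrt trial division per frequency, B groups the occurrence indices of each letter into a positions dict and checks consecutive-occurrence gaps >= 5 per letter, and decides primality of frequencies by a precomputed composite (sieve-style multiples) table up to len(s).
import Mathlib
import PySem

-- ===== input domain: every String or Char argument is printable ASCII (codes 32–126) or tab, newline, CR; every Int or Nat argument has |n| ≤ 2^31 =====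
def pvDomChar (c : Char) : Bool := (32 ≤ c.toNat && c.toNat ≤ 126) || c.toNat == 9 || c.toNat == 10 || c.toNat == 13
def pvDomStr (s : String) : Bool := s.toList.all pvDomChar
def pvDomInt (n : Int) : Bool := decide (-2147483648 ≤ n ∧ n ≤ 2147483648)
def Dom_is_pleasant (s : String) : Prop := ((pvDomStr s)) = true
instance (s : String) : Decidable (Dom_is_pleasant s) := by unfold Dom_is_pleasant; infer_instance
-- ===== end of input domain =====

-- B replaces A's Counter + sliding deque window + adjacency pass + per-frequency sqrt trial
-- division by a per-letter occurrence-positions dict with consecutive-gap checks and a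
-- precomputed composite (sieve-of-multiples) table for the primality of the frequencies.


-- ===== PORT A =====
-- int(math.sqrt(n)) ported as Nat.sqrt on n.toNat: exact for 0 ≤ n < 2^52 (here n is a
-- letter frequency, far below that bound).
def pvSqrtIntA (n : Int) : Int := ((n.toNat.sqrt : Nat) : Int)

-- A's inner is_prime: odd trial divisors 3,5,… up to int(sqrt(n)).
def pvIsPrimeA (n : Int) : Bool :=
  if n < 2 ∨ (n > 2 ∧ PySem.Int.mod n 2 = 0) then false
  else (PySem.List.pyRange 3 (pvSqrtIntA n + 1) 2).all (fun i => !(PySem.Int.mod n i == 0))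

-- A's deque(maxlen=4) loop: 'if letter in queue: return False; queue.append(letter)'
def pvWindowA : List Char → List Char → Bool
  | _, [] => true
  | q, c :: rest =>
    if q.contains c then false
    else
      let q' := q ++ [c]
      pvWindowA (q'.drop (q'.length - 4)) rest

-- A's 'for i in range(len(s)-1): if s[i] == s[i+1]: return False'
def pvAdjA (cs : List Char) : Bool :=
  (PySem.List.pyRange 0 ((cs.length : Int) - 1) 1).all
    (fun i => !(PySem.List.pyGet? cs i == PySem.List.pyGet? cs (i + 1)))

def is_pleasant (s : String) : Bool :=
  let cs := s.toList
  if cs.length < 4 then false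
  else
    ((PySem.Dict.counter cs).values).all (fun f => !(decide (f < 2)) && pvIsPrimeA f)
      && pvWindowA [] cs && pvAdjA cs

-- ===== PORT B =====
-- B's composite table: comp = [False]*(n+1); for d in range(2,n+1): for m in range(2*d,n+1,d): comp[m]=True
def pvCompB (n : Int) : List Bool :=
  (PySem.List.pyRange 2 (n + 1) 1).foldl
    (fun comp d =>
      (PySem.List.pyRange (2 * d) (n + 1) d).foldl (fun c m => c.set m.toNat true) comp)
    (List.replicate (n + 1).toNat false)

-- B's positions dict: for i, c in enumerate(s): pos.setdefault(c, []).append(i)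
def pvPosB (cs : List Char) : PySem.Dict Char (List Int) :=
  (PySem.List.enumerate cs 0).foldl
    (fun d p => d.modify p.2 [] (fun l => l ++ [p.1])) PySem.Dict.empty

def is_pleasant_alt (s : String) : Bool :=
  let cs := s.toList
  if cs.length < 4 then false
  else
    let comp := pvCompB (cs.length : Int)
    ((pvPosB cs).values).all (fun ps =>
      !(decide (ps.length < 2)) && !(comp.getD ps.length false)
        && (List.zip ps (ps.drop 1)).all (fun ab => !(decide (ab.2 - ab.1 < 5))))

-- ===== PRECONDITION & SPEC =====
def Spec_is_pleasant (s : String) (out : Bool) : Prop := out = is_pleasant_alt s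
instance (s : String) (out : Bool) : Decidable (Spec_is_pleasant s out) := by unfold Spec_is_pleasant; infer_instance

-- ===== CLAIM (what is proved, stated in full; the proofs are below) =====
def Claim_equal_is_pleasant : Prop := ∀ (s : String), Dom_is_pleasant s → Spec_is_pleasant s (is_pleasant s)

-- ===== LEMMAS AND PROOFS =====

-- ---- the composite table: comp[j] ↔ j is a product of two factors ≥ 2 ----

lemma getD_foldl_set (l : List Int) (c : List Bool) (j : Nat) :
    (l.foldl (fun c m => c.set m.toNat true) c).getD j false
      = (c.getD j false || l.any (fun m => m.toNat == j && decide (j < c.length))) := by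
  induction l generalizing c with
  | nil => simp
  | cons m l ih =>
    rw [List.foldl_cons, ih]
    have hset : (c.set m.toNat true).getD j false
        = (c.getD j false || (m.toNat == j && decide (j < c.length))) := by
      rcases eq_or_ne m.toNat j with he | hne
      · subst he
        by_cases hlt : m.toNat < c.length
        · simp [List.getD_eq_getElem?_getD, hlt]
        · rw [List.set_eq_of_length_le (by omega)]
          simp [hlt]
      · simp [List.getD_eq_getElem?_getD, List.getElem?_set_ne hne, hne]
    simp only [List.length_set, hset, Bool.or_assoc, List.any_cons]

lemma length_foldl_set (l : List Int) (c : List Bool) :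
    (l.foldl (fun c m => c.set m.toNat true) c).length = c.length := by
  induction l generalizing c with
  | nil => rfl
  | cons m l ih => rw [List.foldl_cons, ih, List.length_set]

lemma getD_foldl_foldl_set (L : List Int) (F : Int → List Int) (c : List Bool) (j : Nat) :
    (L.foldl (fun c d => (F d).foldl (fun c m => c.set m.toNat true) c) c).getD j false
      = (c.getD j false
          || L.any (fun d => (F d).any (fun m => m.toNat == j && decide (j < c.length)))) := by
  induction L generalizing c with
  | nil => simp
  | cons d L ih =>
    rw [List.foldl_cons, ih, getD_foldl_set, length_foldl_set]
    simp only [Bool.or_assoc, List.any_cons]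

lemma getD_pvCompB (n : Int) (j : Nat) (hj : (j : Int) ≤ n) :
    (pvCompB n).getD j false = true ↔ ∃ d k : Nat, 2 ≤ d ∧ 2 ≤ k ∧ d * k = j := by
  have hn : 0 ≤ n := le_trans (by positivity) hj
  rw [pvCompB, getD_foldl_foldl_set]
  have hrep : (List.replicate (n + 1).toNat false).getD j false = false := by
    simp only [List.getD_eq_getElem?_getD, List.getElem?_replicate]
    split <;> rfl
  have hlen : (j < (List.replicate (n + 1).toNat false).length) := by
    simp [List.length_replicate]; omega
  simp only [hrep, Bool.false_or, List.any_eq_true, Bool.and_eq_true, beq_iff_eq,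
    decide_eq_true_eq]
  constructor
  · rintro ⟨d, hd, m, hm, hmj, -⟩
    rw [PySem.List.mem_pyRange_one] at hd
    rw [PySem.List.mem_pyRange_iff_of_pos (by omega : (0:Int) < d)] at hm
    obtain ⟨hm1, hm2, hdvd⟩ := hm
    obtain ⟨t, ht⟩ := hdvd
    have hk : m = d * (t + 2) := by linear_combination ht
    have hk2 : 2 ≤ t + 2 := by nlinarith
    have hd0 : (d.toNat : Int) = d := Int.toNat_of_nonneg (by omega)
    have hk0 : ((t + 2).toNat : Int) = t + 2 := Int.toNat_of_nonneg (by omega)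
    refine ⟨d.toNat, (t + 2).toNat, by omega, by omega, ?_⟩
    have hcast : ((d.toNat * (t + 2).toNat : Nat) : Int) = m := by
      push_cast [hd0, hk0]; linarith [hk]
    omega
  · rintro ⟨d, k, hd2, hk2, hdk⟩
    have hdj : d ≤ j := by nlinarith
    refine ⟨(d : Int), ?_, (j : Int), ?_, by omega, hlen⟩
    · rw [PySem.List.mem_pyRange_one]
      constructor
      · exact_mod_cast hd2
      · have : (d : Int) ≤ (j : Int) := by exact_mod_cast hdj
        omega
    · rw [PySem.List.mem_pyRange_iff_of_pos (by exact_mod_cast (by omega : 0 < d) : (0:Int) < (d:Int))]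
      refine ⟨?_, by omega, ?_⟩
      · have : d * 2 ≤ d * k := by nlinarith
        have : ((d * 2 : Nat) : Int) ≤ ((d * k : Nat) : Int) := by exact_mod_cast this
        push_cast at this ⊢
        omega
      · have h1 : (d : Int) ∣ (j : Int) := by
          refine ⟨(k : Int), ?_⟩
          exact_mod_cast hdk.symm
        exact dvd_sub h1 ⟨2, by ring⟩

-- ---- A's primality test, characterised ----

lemma le_sqrt_iff (n e : Int) (hn : 0 ≤ n) (he : 0 ≤ e) : e ≤ pvSqrtIntA n ↔ e * e ≤ n := by
  rw [pvSqrtIntA]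
  have hcast : e = (e.toNat : Int) := (Int.toNat_of_nonneg he).symm
  have hncast : n = (n.toNat : Int) := (Int.toNat_of_nonneg hn).symm
  constructor
  · intro h
    have h1 : e.toNat ≤ Nat.sqrt n.toNat := by omega
    have h2 := Nat.le_sqrt.mp h1
    rw [hcast, hncast]; exact_mod_cast h2
  · intro h
    have h2 : e.toNat * e.toNat ≤ n.toNat := by
      rw [hcast, hncast] at h; exact_mod_cast h
    have := Nat.le_sqrt.mpr h2
    omega

lemma primeA_iff (f : Int) :
    (!(decide (f < 2)) && pvIsPrimeA f) = true
      ↔ (2 ≤ f ∧ ∀ e : Int, 2 ≤ e → e * e ≤ f → ¬ e ∣ f) := by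
  rcases lt_or_ge f 2 with h2 | h2
  · apply iff_of_false
    · simp [h2]
    · rintro ⟨hf, -⟩; omega
  · have hL : (!(decide (f < 2)) && pvIsPrimeA f) = pvIsPrimeA f := by
      simp [show ¬ (f < 2) by omega]
    rw [hL]
    by_cases heven : (2:Int) ∣ f
    · by_cases hf2 : f = 2
      · subst hf2
        apply iff_of_true
        · rw [pvIsPrimeA, if_neg (by norm_num)]
          rw [List.all_eq_true]
          intro i hi
          rw [PySem.List.mem_pyRange_iff_of_pos (by norm_num : (0:Int) < 2)] at hi
          have hs : pvSqrtIntA 2 < 2 := by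
            by_contra hge
            have := (le_sqrt_iff 2 2 (by norm_num) (by norm_num)).mp (by omega)
            norm_num at this
          obtain ⟨h1, h2, -⟩ := hi
          omega
        · exact ⟨le_rfl, fun e he hee => by nlinarith⟩
      · apply iff_of_false
        · rw [pvIsPrimeA, if_pos]
          · exact Bool.false_ne_true
          · exact Or.inr ⟨by omega, (PySem.Int.mod_eq_zero_iff_dvd f 2).mpr heven⟩
        · rintro ⟨-, hall⟩
          exact hall 2 le_rfl (by omega) heven
    · have hmod2 : ¬ PySem.Int.mod f 2 = 0 := fun h => heven ((PySem.Int.mod_eq_zero_iff_dvd f 2).mp h)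
      rw [pvIsPrimeA, if_neg (by push Not; exact ⟨by omega, fun _ => hmod2⟩)]
      simp only [List.all_eq_true, PySem.List.mem_pyRange_iff_of_pos (by norm_num : (0:Int) < 2),
        Bool.not_eq_eq_eq_not, Bool.not_true, beq_eq_false_iff_ne, ne_eq, and_imp]
      constructor
      · intro h
        refine ⟨h2, fun e he hee hdvd => ?_⟩
        by_cases he2 : (2:Int) ∣ e
        · exact heven (dvd_trans he2 hdvd)
        · have he3 : 3 ≤ e := by omega
          have hesq : e < pvSqrtIntA f + 1 := by
            have := (le_sqrt_iff f e (by omega) (by omega)).mpr hee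
            omega
          exact h e he3 hesq (by omega) ((PySem.Int.mod_eq_zero_iff_dvd f e).mpr hdvd)
      · rintro ⟨-, hall⟩
        intro i h3 hlt hpar hm
        have hii : i * i ≤ f := (le_sqrt_iff f i (by omega) (by omega)).mp (by omega)
        exact hall i (by omega) hii ((PySem.Int.mod_eq_zero_iff_dvd f i).mp hm)

lemma noSqDvd_iff_noFactor (j : Nat) :
    (∀ e : Int, 2 ≤ e → e * e ≤ (j:Int) → ¬ e ∣ (j:Int))
      ↔ ¬ ∃ d k : Nat, 2 ≤ d ∧ 2 ≤ k ∧ d * k = j := by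
  constructor
  · rintro h ⟨d, k, hd, hk, hdk⟩
    rcases le_total d k with hle | hle
    · refine h (d:Int) (by exact_mod_cast hd) ?_ ⟨(k:Int), by exact_mod_cast hdk.symm⟩
      have : d * d ≤ d * k := Nat.mul_le_mul_left d hle
      rw [hdk] at this
      exact_mod_cast this
    · refine h (k:Int) (by exact_mod_cast hk) ?_ ⟨(d:Int), by
        have : (j:Int) = ((d * k : Nat) : Int) := by exact_mod_cast hdk.symm
        push_cast at this
        linarith [this]⟩
      have : k * k ≤ d * k := Nat.mul_le_mul_right k hle
      rw [hdk] at this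
      exact_mod_cast this
  · intro h e he hee hdvd
    obtain ⟨q, hq⟩ := hdvd
    have hq2 : 2 ≤ q := by nlinarith
    apply h
    have he0 : (e.toNat : Int) = e := Int.toNat_of_nonneg (by omega)
    have hq0 : (q.toNat : Int) = q := Int.toNat_of_nonneg (by omega)
    refine ⟨e.toNat, q.toNat, by omega, by omega, ?_⟩
    have : ((e.toNat * q.toNat : Nat) : Int) = (j : Int) := by
      push_cast [he0, hq0]; linarith [hq]
    omega

-- A's test equals B's table-based test, for a frequency j ≤ n
lemma primeAB (n : Int) (j : Nat) (hj : (j : Int) ≤ n) :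
    (!(decide ((j : Int) < 2)) && pvIsPrimeA (j : Int))
      = (!(decide (j < 2)) && !((pvCompB n).getD j false)) := by
  by_cases h2 : j < 2
  · have hI : ((j:Int) < 2) := by exact_mod_cast h2
    simp [hI, h2]
  · have h2' : 2 ≤ j := by omega
    rw [Bool.eq_iff_iff, primeA_iff]
    simp only [Bool.and_eq_true, Bool.not_eq_true', decide_eq_false_iff_not, Nat.not_lt]
    constructor
    · rintro ⟨-, hall⟩
      have hno := (noSqDvd_iff_noFactor j).mp hall
      have hfalse : (pvCompB n).getD j false = false := by
        cases hgd : (pvCompB n).getD j false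
        · rfl
        · exact absurd ((getD_pvCompB n j hj).mp hgd) hno
      exact ⟨h2', hfalse⟩
    · rintro ⟨hge, hfalse⟩
      refine ⟨by exact_mod_cast hge, (noSqDvd_iff_noFactor j).mpr ?_⟩
      intro hex
      rw [(getD_pvCompB n j hj).mpr hex] at hfalse
      cases hfalse

-- ---- occurrence positions of a letter ----

def pvOcc (cs : List Char) (c : Char) : List Int :=
  ((PySem.List.enumerate cs 0).filter (fun p => p.2 == c)).map (·.1)

lemma getD_pvPosB (cs : List Char) (c : Char) :
    (pvPosB cs).getD c [] = pvOcc cs c := by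
  have hfold :
      pvPosB cs
        = ((PySem.List.enumerate cs 0).map Prod.swap).foldl
            (fun d p => d.modify p.1 [] (fun l => l ++ [p.2])) PySem.Dict.empty := by
    rw [pvPosB, List.foldl_map]
    rfl
  rw [hfold, PySem.Dict.getD_foldl_modify_append, PySem.Dict.getD_empty, List.nil_append]
  rw [pvOcc, List.filter_map, List.map_map]
  rfl

lemma keys_pvPosB (cs : List Char) : (pvPosB cs).keys = PySem.Set.ofList cs := by
  rw [pvPosB, PySem.Dict.keys_foldl_modify_key, PySem.Dict.keys_empty,
    PySem.List.map_snd_enumerate, PySem.Set.update_nil_left]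

lemma values_pvPosB (cs : List Char) :
    (pvPosB cs).values = (PySem.Set.ofList cs).map (pvOcc cs) := by
  have hnd : (pvPosB cs).keys.Nodup := by
    rw [keys_pvPosB]; exact PySem.Set.nodup_ofList cs
  rw [PySem.Dict.values_eq_map_keys (pvPosB cs) hnd []]
  rw [keys_pvPosB]
  exact List.map_congr_left fun c _ => getD_pvPosB cs c

lemma length_pvOcc (cs : List Char) (c : Char) : (pvOcc cs c).length = cs.count c := by
  have hc : cs.count c = List.countP (fun p => p.2 == c) (PySem.List.enumerate cs 0) := by
    conv_lhs => rw [List.count, ← PySem.List.map_snd_enumerate cs 0]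
    rw [List.countP_map]
    rfl
  rw [pvOcc, List.length_map, ← List.countP_eq_length_filter, hc]

lemma mem_pvOcc (cs : List Char) (c : Char) (x : Int) :
    x ∈ pvOcc cs c ↔ ∃ k : Nat, x = (k : Int) ∧ cs[k]? = some c := by
  rw [pvOcc]
  simp only [List.mem_map, List.mem_filter]
  constructor
  · rintro ⟨p, ⟨hp, hpc⟩, rfl⟩
    rw [PySem.List.mem_enumerate_iff] at hp
    obtain ⟨k, hk, rfl⟩ := hp
    refine ⟨k, by simp, ?_⟩
    rw [List.getElem?_eq_getElem hk]
    simpa using hpc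
  · rintro ⟨k, rfl, hk⟩
    have hklt : k < cs.length := by
      by_contra hge
      rw [List.getElem?_eq_none (by omega)] at hk
      cases hk
    refine ⟨((k : Int), cs[k]), ?_, by simp⟩
    refine ⟨?_, ?_⟩
    · rw [PySem.List.mem_enumerate_iff]
      exact ⟨k, hklt, by simp⟩
    · rw [List.getElem?_eq_getElem hklt] at hk
      simpa using hk

lemma pairwise_pvOcc (cs : List Char) (c : Char) : (pvOcc cs c).Pairwise (· < ·) := by
  rw [pvOcc]
  refine List.Pairwise.map _ (fun a b h => h) ?_
  refine List.Pairwise.filter _ ?_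
  exact PySem.List.pairwise_lt_enumerate cs 0

-- ---- the 5-window distinctness property ----

def pvQ (cs : List Char) : Prop :=
  ∀ k m : Nat, k < m → m ≤ k + 4 → ∀ c : Char, cs[k]? = some c → cs[m]? ≠ some c

def pvLast4 (p : List Char) : List Char := p.drop (p.length - 4)

lemma mem_pvLast4 (p : List Char) (c : Char) :
    c ∈ pvLast4 p ↔ ∃ k : Nat, p[k]? = some c ∧ p.length ≤ k + 4 := by
  rw [pvLast4]
  constructor
  · intro h
    rw [List.mem_iff_getElem?] at h
    obtain ⟨m, hm⟩ := h
    rw [List.getElem?_drop] at hm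
    refine ⟨p.length - 4 + m, hm, ?_⟩
    have : p.length - 4 + m < p.length := by
      by_contra hge
      rw [List.getElem?_eq_none (by omega)] at hm
      simp at hm
    omega
  · rintro ⟨k, hk, hle⟩
    have hklen : k < p.length := by
      by_contra hge
      rw [List.getElem?_eq_none (by omega)] at hk
      simp at hk
    rw [List.mem_iff_getElem?]
    exact ⟨k - (p.length - 4), by rw [List.getElem?_drop]; rw [show p.length - 4 + (k - (p.length - 4)) = k by omega]; exact hk⟩

lemma pvLast4_step (p : List Char) (c : Char) :
    ((pvLast4 p ++ [c]).drop ((pvLast4 p ++ [c]).length - 4)) = pvLast4 (p ++ [c]) := by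
  rw [pvLast4, pvLast4]
  have hlen : (p.drop (p.length - 4)).length = p.length - (p.length - 4) := List.length_drop ..
  rcases le_or_gt p.length 3 with hle | hgt
  · have h0 : p.length - 4 = 0 := by omega
    simp [h0, List.length_append]
  · have h4 : (p.drop (p.length - 4)).length = 4 := by omega
    have h1 : (p.drop (p.length - 4) ++ [c]).length - 4 = 1 := by simp [h4]
    rw [h1, List.drop_append_of_le_length (by omega : 1 ≤ (p.drop (p.length - 4)).length),
        List.drop_drop]
    rw [show ((p ++ [c]).length - 4) = p.length - 3 by simp]
    rw [List.drop_append_of_le_length (by omega : p.length - 3 ≤ p.length)]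
    rw [show p.length - 4 + 1 = p.length - 3 by omega]

lemma windowA_iff (rest p : List Char) :
    pvWindowA (pvLast4 p) rest = true
      ↔ ∀ k m : Nat, k < m → m ≤ k + 4 → p.length ≤ m →
          ∀ c : Char, (p ++ rest)[k]? = some c → (p ++ rest)[m]? ≠ some c := by
  induction rest generalizing p with
  | nil =>
    apply iff_of_true
    · rfl
    · intro k m hkm hm4 hpm c hk
      rw [List.append_nil, List.getElem?_eq_none (by omega : p.length ≤ m)]
      simp
  | cons c0 rest ih =>
    rw [pvWindowA]
    by_cases hc : (pvLast4 p).contains c0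
    · rw [if_pos hc]
      simp only [Bool.false_eq_true, false_iff]
      intro hall
      rw [List.contains_iff_mem, mem_pvLast4] at hc
      obtain ⟨k, hk, hk4⟩ := hc
      have hklt : k < p.length := by
        by_contra hge
        rw [List.getElem?_eq_none (by omega)] at hk; cases hk
      have hkeq : (p ++ c0 :: rest)[k]? = some c0 := by
        rw [List.getElem?_append_left hklt]; exact hk
      have hmeq : (p ++ c0 :: rest)[p.length]? = some c0 := by
        rw [List.getElem?_append_right (le_refl p.length), Nat.sub_self]
        rfl
      exact (hall k p.length hklt (by omega) le_rfl c0 hkeq) hmeq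
    · rw [if_neg hc]
      simp only []
      rw [pvLast4_step, ih (p ++ [c0])]
      rw [show p ++ c0 :: rest = (p ++ [c0]) ++ rest from by simp]
      constructor
      · intro h k m hkm h4 hpm c hk hm
        rcases eq_or_lt_of_le hpm with heq | hlt
        · -- m = p.length: char there is c0, so a repeat inside the last-4 window of p
          have hmeq : ((p ++ [c0]) ++ rest)[m]? = some c0 := by
            rw [← heq, List.getElem?_append_left (by simp),
              List.getElem?_append_right (le_refl p.length), Nat.sub_self]
            rfl
          rw [hm] at hmeq
          injection hmeq with hcc
          have hklt : k < p.length := by omega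
          apply hc
          rw [List.contains_iff_mem, mem_pvLast4]
          refine ⟨k, ?_, by omega⟩
          rw [List.getElem?_append_left (show k < (p ++ [c0]).length by simp; omega),
            List.getElem?_append_left hklt] at hk
          rw [hk, hcc]
        · exact h k m hkm h4 (by simp; omega) c hk hm
      · intro h k m hkm h4 hpm c hk hm
        exact h k m hkm h4 (by simp at hpm ⊢; omega) c hk hm

lemma windowA_nil_start (cs : List Char) : pvWindowA [] cs = pvWindowA (pvLast4 []) cs := rfl

lemma windowA_iff_pvQ (cs : List Char) : pvWindowA [] cs = true ↔ pvQ cs := by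
  rw [windowA_nil_start, windowA_iff]
  rw [pvQ]
  constructor
  · intro h k m hkm h4 c hk hm
    exact h k m hkm h4 (by simp) c (by simpa using hk) (by simpa using hm)
  · intro h k m hkm h4 _ c hk hm
    exact h k m hkm h4 c (by simpa using hk) (by simpa using hm)

lemma adjA_of_pvQ (cs : List Char) (h : pvQ cs) : pvAdjA cs = true := by
  rw [pvAdjA, List.all_eq_true]
  intro i hi
  rw [PySem.List.mem_pyRange_one] at hi
  obtain ⟨h0, hlt⟩ := hi
  set k := i.toNat with hkdef
  have hik : i = (k : Int) := by omega
  have hk1 : k + 1 < cs.length := by omega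
  rw [hik, show ((k : Int) + 1) = ((k + 1 : Nat) : Int) by push_cast; ring,
      PySem.List.pyGet?_natCast, PySem.List.pyGet?_natCast]
  have h1 : cs[k]? = some cs[k] := List.getElem?_eq_getElem (by omega)
  have h2 : cs[k + 1]? = some (cs[k + 1]'hk1) := List.getElem?_eq_getElem hk1
  have hne := h k (k + 1) (by omega) (by omega) (cs[k]'(by omega)) h1
  rw [h2] at hne
  rw [h1, h2]
  simp only [Bool.not_eq_eq_eq_not, Bool.not_true, beq_eq_false_iff_ne, ne_eq]
  intro hcontra
  exact hne (congrArg some (by injection hcontra with hx; exact hx.symm))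

-- ---- B's gap checks equal the 5-window property ----

lemma gaps_ok_iff (l : List Int) :
    ((List.zip l (l.drop 1)).all (fun ab => !(decide (ab.2 - ab.1 < 5)))) = true
      ↔ ∀ i : Nat, (h : i + 1 < l.length) → l[i + 1] - l[i] ≥ 5 := by
  rw [List.all_eq_true]
  constructor
  · intro h i hi
    have hdrop : (l.drop 1)[i]'(by rw [List.length_drop]; omega) = l[i + 1] := by
      rw [List.getElem_drop]
      congr 1
      omega
    have hmem : (l[i]'(by omega), l[i + 1]'hi) ∈ List.zip l (l.drop 1) := by
      rw [List.mem_iff_getElem]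
      refine ⟨i, by rw [List.length_zip, List.length_drop]; omega, ?_⟩
      rw [List.getElem_zip, hdrop]
    have := h _ hmem
    simp only [Bool.not_eq_eq_eq_not, Bool.not_true,
      decide_eq_false_iff_not, not_lt] at this
    omega
  · intro h ab hab
    rw [List.mem_iff_getElem] at hab
    obtain ⟨i, hi, hab⟩ := hab
    rw [List.length_zip, List.length_drop] at hi
    have hi1 : i + 1 < l.length := by omega
    rw [List.getElem_zip] at hab
    have hdrop : (l.drop 1)[i]'(by rw [List.length_drop]; omega) = l[i + 1] := by
      rw [List.getElem_drop]
      congr 1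
      omega
    rw [hdrop] at hab
    have := h i hi1
    rw [← hab]
    simp only [Bool.not_eq_eq_eq_not, Bool.not_true, decide_eq_false_iff_not, not_lt]
    omega

lemma occ_getElem_mono (cs : List Char) (c : Char) (a b : Nat) (hab : a < b)
    (hb : b < (pvOcc cs c).length) :
    (pvOcc cs c)[a]'(by omega) < (pvOcc cs c)[b]'hb := by
  have hp := pairwise_pvOcc cs c
  rw [List.pairwise_iff_getElem] at hp
  exact hp a b (by omega) hb hab

lemma gaps_iff_pvQ (cs : List Char) :
    ((PySem.Set.ofList cs).all (fun c =>
        (List.zip (pvOcc cs c) ((pvOcc cs c).drop 1)).all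
          (fun ab => !(decide (ab.2 - ab.1 < 5))))) = true
      ↔ pvQ cs := by
  rw [List.all_eq_true]
  constructor
  · intro h k m hkm hm4 c hk hm
    have hc : c ∈ cs := List.mem_of_getElem? hk
    have hg := (gaps_ok_iff _).mp (h c (by rw [PySem.Set.mem_ofList]; exact hc))
    have hkmem : ((k : Int)) ∈ pvOcc cs c := (mem_pvOcc cs c _).mpr ⟨k, rfl, hk⟩
    have hmmem : ((m : Int)) ∈ pvOcc cs c := (mem_pvOcc cs c _).mpr ⟨m, rfl, hm⟩
    obtain ⟨i, hilt, hieq⟩ := List.mem_iff_getElem.mp hkmem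
    obtain ⟨j, hjlt, hjeq⟩ := List.mem_iff_getElem.mp hmmem
    have hij : i < j := by
      by_contra hge
      rcases eq_or_lt_of_le (not_lt.mp hge) with he | hlt'
      · have hkm' : (k : Int) = (m : Int) := by subst he; rw [← hieq, ← hjeq]
        omega
      · have := occ_getElem_mono cs c j i hlt' hilt
        rw [hieq, hjeq] at this
        omega
    have hcons := hg i (by omega)
    have hle : (pvOcc cs c)[i + 1]'(by omega) ≤ (pvOcc cs c)[j]'hjlt := by
      rcases eq_or_lt_of_le (by omega : i + 1 ≤ j) with he | hlt'
      · subst he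
        exact le_rfl
      · exact le_of_lt (occ_getElem_mono cs c (i + 1) j hlt' hjlt)
    rw [hjeq] at hle
    rw [hieq] at hcons
    omega
  · intro hq c hcset
    rw [gaps_ok_iff]
    intro i hi
    by_contra hlt
    rw [not_le] at hlt
    have h1 : (pvOcc cs c)[i]'(by omega) ∈ pvOcc cs c := List.getElem_mem _
    have h2 : (pvOcc cs c)[i + 1]'hi ∈ pvOcc cs c := List.getElem_mem _
    obtain ⟨k, hkeq, hk⟩ := (mem_pvOcc cs c _).mp h1
    obtain ⟨m, hmeq, hm⟩ := (mem_pvOcc cs c _).mp h2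
    have hmono := occ_getElem_mono cs c i (i + 1) (by omega) hi
    rw [hkeq, hmeq] at hmono hlt
    exact hq k m (by omega) (by omega) c hk hm

-- ---- assembly ----

lemma mainAB (cs : List Char) :
    (if cs.length < 4 then false
     else ((PySem.Dict.counter cs).values).all (fun f => !(decide (f < 2)) && pvIsPrimeA f)
          && pvWindowA [] cs && pvAdjA cs)
    = (if cs.length < 4 then false
       else ((pvPosB cs).values).all (fun ps =>
         !(decide (ps.length < 2)) && !((pvCompB (cs.length : Int)).getD ps.length false)
           && (List.zip ps (ps.drop 1)).all (fun ab => !(decide (ab.2 - ab.1 < 5))))) := by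
  by_cases hlen : cs.length < 4
  · simp [hlen]
  · rw [if_neg hlen, if_neg hlen]
    rw [values_pvPosB]
    have hcv : (PySem.Dict.counter cs).values
        = (PySem.Set.ofList cs).map (fun c => (cs.count c : Int)) := by
      rw [PySem.Dict.values_eq_map_keys _ (PySem.Dict.nodup_keys_counter cs) 0,
        PySem.Dict.keys_counter]
      exact List.map_congr_left fun c _ => PySem.Dict.getD_counter cs c
    rw [hcv, List.all_map, List.all_map]
    cases hw : pvWindowA [] cs with
    | false =>
      rw [Bool.and_false, Bool.false_and]
      have hnq : ¬ pvQ cs := fun hq =>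
        absurd ((windowA_iff_pvQ cs).mpr hq) (by rw [hw]; exact Bool.false_ne_true)
      have hgap : ((PySem.Set.ofList cs).all (fun c =>
          (List.zip (pvOcc cs c) ((pvOcc cs c).drop 1)).all
            (fun ab => !(decide (ab.2 - ab.1 < 5))))) = false := by
        cases hb : (PySem.Set.ofList cs).all (fun c =>
            (List.zip (pvOcc cs c) ((pvOcc cs c).drop 1)).all
              (fun ab => !(decide (ab.2 - ab.1 < 5)))) with
        | false => rfl
        | true => exact absurd ((gaps_iff_pvQ cs).mp hb) hnq
      rw [List.all_eq_false] at hgap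
      obtain ⟨c, hc, hcf⟩ := hgap
      symm
      rw [List.all_eq_false]
      refine ⟨c, hc, ?_⟩
      intro hcontra
      simp only [Function.comp_apply] at hcontra
      exact hcf ((Bool.and_eq_true _ _).mp hcontra).2
    | true =>
      have hq := (windowA_iff_pvQ cs).mp hw
      rw [adjA_of_pvQ cs hq, Bool.and_true, Bool.and_true]
      have hg := (gaps_iff_pvQ cs).mpr hq
      rw [List.all_eq_true] at hg
      rw [Bool.eq_iff_iff, List.all_eq_true, List.all_eq_true]
      constructor
      · intro hall c hc
        have h1 := hall c hc
        simp only [Function.comp_apply] at h1 ⊢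
        rw [primeAB (cs.length : Int) (cs.count c)
          (by exact_mod_cast List.count_le_length (l := cs) (a := c)),
          ← length_pvOcc cs c] at h1
        rw [Bool.and_eq_true]
        exact ⟨h1, hg c hc⟩
      · intro hall c hc
        have h1 := ((Bool.and_eq_true _ _).mp (hall c hc)).1
        simp only [Function.comp_apply] at h1 ⊢
        rw [primeAB (cs.length : Int) (cs.count c)
          (by exact_mod_cast List.count_le_length (l := cs) (a := c)),
          ← length_pvOcc cs c]
        exact h1

-- ===== VERDICT (by name: the statement is the Claim_ definition above) =====
theorem is_pleasant_spec : Claim_equal_is_pleasant := by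
  intro s _
  show is_pleasant s = is_pleasant_alt s
  simp only [is_pleasant, is_pleasant_alt]
  exact mainAB s.toList
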